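-- pv_equiv track=rewrite | github.com/Philtesting/Exercice-Python | Exo ++/Test.py | f
-- ===== SOURCE A (Python) =====
-- def f(l1):
--     l2=[]
--     l3=[]
--     for i in range(len(l1)):
--         l2.append([])
--         l3.append([])
--         for x in range(len(l1)):
--            l2[i].append(l1[i-x])
--         if l2[i] not in l3:
--             l3[i] = l2[i]
--     return l3
-- ===== SOURCE B (Python) =====
-- def f(l1):
--     n = len(l1)
--     if n == 0:
--         return []
--     # minimal cyclic period: smallest d >= 1 with l1 invariant under rotation by d
--     p = next(d for d in range(1, n + 1)
--              if all(l1[k] == l1[(k + d) % n] for k in range(n)))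
--     return [l1[:i + 1][::-1] + l1[i + 1:][::-1] for i in range(p)] + [[]] * (n - p)
-- ===== Notes on version B (the rewrite author's own statement) =====
-- stated objective: alternative
-- what changed: A builds every reversed rotation and blanks row i by scanning the growing output for an equal row; B never compares rows: it computes the minimal cyclic period p of the list (smallest d with l1[k]==l1[(k+d)%n] for all k) and returns the first p reversed rotations built by slice-reverse followed by n-p empty placeholders, relying on the fact that row i duplicates an earlier row exactly when p <= i.
import Mathlib
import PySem

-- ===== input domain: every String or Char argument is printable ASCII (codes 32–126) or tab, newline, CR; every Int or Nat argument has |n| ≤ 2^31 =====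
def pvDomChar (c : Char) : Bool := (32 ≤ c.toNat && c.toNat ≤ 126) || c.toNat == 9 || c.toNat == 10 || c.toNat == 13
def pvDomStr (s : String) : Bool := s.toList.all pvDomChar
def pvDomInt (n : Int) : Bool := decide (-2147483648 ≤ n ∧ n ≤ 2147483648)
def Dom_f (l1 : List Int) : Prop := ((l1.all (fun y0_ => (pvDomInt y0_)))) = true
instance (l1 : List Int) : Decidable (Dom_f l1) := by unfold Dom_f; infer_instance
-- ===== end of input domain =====

-- B replaces A's row-by-row "not in growing output" deduplication by a different algorithm:
-- it computes the minimal cyclic period p of the list and emits the first p reversed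
-- rotations followed by n - p empty placeholders, never comparing rows (alternative algorithm).


-- ===== PORT A =====
-- literal transliteration of A: outer loop over range(len(l1)) keeping (l2, l3);
-- inner loop appends l1[i-x] into l2[i]; then 'if l2[i] not in l3: l3[i] = l2[i]'.
-- (pyGetD/pySetD are the total forms of pyGet?/pySet?; every index A uses is in range.)
def f (l1 : List Int) : List (List Int) :=
  let n : Int := PySem.List.len l1
  let st := (PySem.List.pyRange 0 n 1).foldl
    (fun (st : List (List Int) × List (List Int)) i =>
      let l2 := st.1 ++ [[]]
      let l3 := st.2 ++ [[]]
      let l2 := (PySem.List.pyRange 0 n 1).foldl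
        (fun l2 x => PySem.List.pySetD l2 i
          (PySem.List.pyGetD l2 i [] ++ [PySem.List.pyGetD l1 (i - x) 0])) l2
      let l3 := if (PySem.List.pyGetD l2 i []) ∈ l3
                then l3
                else PySem.List.pySetD l3 i (PySem.List.pyGetD l2 i [])
      (l2, l3)) ([], [])
  st.2

-- ===== PORT B =====
-- transliteration of Source B: find the minimal cyclic period p (first d in range(1, n+1) with
-- l1[k] == l1[(k+d) % n] for all k); emit the first p reversed rotations, then n - p empty lists.
def f_alt (l1 : List Int) : List (List Int) :=
  let n := l1.length
  if n = 0 then []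
  else
    let p := (((List.range' 1 n).find? (fun d =>
      (List.range n).all (fun k => l1.getD ((k + d) % n) 0 == l1.getD k 0))).getD n)
    ((List.range p).map (fun (i : Nat) =>
      (PySem.List.slice l1 none (some ((i : Int) + 1))).reverse ++
      (PySem.List.slice l1 (some ((i : Int) + 1)) none).reverse))
      ++ List.replicate (n - p) []

-- ===== PRECONDITION & SPEC =====
def Spec_f (l1 : List Int) (out : List (List Int)) : Prop := out = f_alt l1
instance (l1 : List Int) (out : List (List Int)) : Decidable (Spec_f l1 out) := by unfold Spec_f; infer_instance

-- ===== CLAIM (what is proved, stated in full; the proofs are below) =====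
def Claim_equal_f : Prop := ∀ (l1 : List Int), Dom_f l1 → Spec_f l1 (f l1)

-- ===== LEMMAS AND PROOFS =====

-- the rotation rows, in the closed take/drop form
def rotRow (l1 : List Int) (i : Nat) : List Int :=
  (l1.take (i + 1)).reverse ++ (l1.drop (i + 1)).reverse

def rotsOf (l1 : List Int) : List (List Int) :=
  (List.range l1.length).map (rotRow l1)

-- canonical "keep first occurrence, blank the rest" recursion (A's dedup behaviour)
def mark (seen : List (List Int)) : List (List Int) → List (List Int)
  | [] => []
  | r :: rs => (if r ∈ seen then [] else r) :: mark (seen ++ [r]) rs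

-- A's accumulator step on one row
def stepA (acc : List (List Int)) (r : List Int) : List (List Int) :=
  acc ++ [if r ∈ acc ++ [[]] then [] else r]

theorem length_rotRow (l1 : List Int) (i : Nat) : (rotRow l1 i).length = l1.length := by
  simp [rotRow]; omega

theorem getD_append_singleton (pre : List (List Int)) (cur : List Int) (k : Nat)
    (h : pre.length = k) : (pre ++ [cur]).getD k [] = cur := by
  subst h; simp [List.getD]

theorem set_append_singleton (pre : List (List Int)) (cur v : List Int) (k : Nat)
    (h : pre.length = k) : (pre ++ [cur]).set k v = pre ++ [v] := by
  subst h
  induction pre with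
  | nil => simp
  | cons p ps ih => simp [ih]

-- the inner loop of A appends the indexed elements to slot k
theorem innerA (l1 : List Int) (k : Nat) (b : Int) :
    ∀ (m : Nat) (a : Int), 0 ≤ a → (b - a).toNat = m →
    ∀ (pre : List (List Int)) (cur : List Int), pre.length = k →
    (PySem.List.pyRange a b 1).foldl
      (fun l2 x => PySem.List.pySetD l2 (k : Int)
        (PySem.List.pyGetD l2 (k : Int) [] ++ [PySem.List.pyGetD l1 ((k : Int) - x) 0]))
      (pre ++ [cur])
    = pre ++ [cur ++ (PySem.List.pyRange a b 1).map (fun x => PySem.List.pyGetD l1 ((k : Int) - x) 0)] := by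
  intro m
  induction m with
  | zero =>
    intro a ha hm pre cur hpre
    rw [PySem.List.pyRange_one_eq_nil (by omega)]
    simp
  | succ m ih =>
    intro a ha hm pre cur hpre
    rw [PySem.List.pyRange_one_cons (by omega)]
    simp only [List.foldl_cons, List.map_cons]
    have h1 : PySem.List.pyGetD (pre ++ [cur]) (k : Int) [] = cur := by
      rw [PySem.List.pyGetD_natCast, getD_append_singleton pre cur k hpre]
    have h2 : PySem.List.pySetD (pre ++ [cur]) (k : Int)
        (cur ++ [PySem.List.pyGetD l1 ((k : Int) - a) 0])
        = pre ++ [cur ++ [PySem.List.pyGetD l1 ((k : Int) - a) 0]] := by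
      rw [PySem.List.pySetD_natCast,
        set_append_singleton pre cur _ k hpre]
    rw [h1, h2, ih (a + 1) (by omega) (by omega) pre _ hpre]
    simp

-- A's row at index k is the take/drop-reverse rotation
theorem rowEq (l1 : List Int) (k : Nat) (hk : k < l1.length) :
    (PySem.List.pyRange 0 (l1.length : Int) 1).map
      (fun x => PySem.List.pyGetD l1 ((k : Int) - x) 0) = rotRow l1 k := by
  rw [PySem.List.pyRange_one_append 0 ((k : Int) + 1) (l1.length : Int) (by omega) (by omega),
    List.map_append]
  unfold rotRow
  congr 1
  · apply List.ext_getElem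
    · simp [PySem.List.length_pyRange_one]; omega
    · intro j hj hj'
      have hjlen : j < k + 1 := by
        simpa [PySem.List.length_pyRange_one] using hj
      simp only [List.getElem_map]
      rw [PySem.List.getElem_pyRange_one]
      have hx : (k : Int) - (0 + (j : Int)) = (((k - j : Nat) : Int)) := by omega
      rw [hx, PySem.List.pyGetD_natCast]
      rw [List.getElem_reverse, List.getElem_take]
      rw [List.getD_eq_getElem _ _ (by omega)]
      congr 1
      have hlt : (l1.take (k + 1)).length = k + 1 := by simp; omega
      have hlr : (l1.take (k + 1)).reverse.length = k + 1 := by simp; omega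
      omega
  · apply List.ext_getElem
    · simp [PySem.List.length_pyRange_one]; omega
    · intro j hj hj'
      have hjlen : j < l1.length - (k + 1) := by
        simp [PySem.List.length_pyRange_one] at hj; omega
      simp only [List.getElem_map]
      rw [PySem.List.getElem_pyRange_one]
      have hx : (k : Int) - (((k : Int) + 1) + (j : Int)) = -(((j + 1 : Nat) : Int)) := by
        push_cast; ring
      rw [hx, PySem.List.pyGetD_neg_natCast _ _ _ (by omega) (by omega)]
      rw [List.getElem_reverse, List.getElem_drop]
      congr 1
      have hld : (l1.drop (k + 1)).length = l1.length - (k + 1) := by simp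
      omega

theorem length_foldl_stepA (rs : List (List Int)) (acc : List (List Int)) :
    (rs.foldl stepA acc).length = acc.length + rs.length := by
  induction rs generalizing acc with
  | nil => simp
  | cons r rs ih => simp [ih, stepA]; omega

-- the outer loop of A computes foldl stepA over the rotation rows
theorem outerA (l1 : List Int) :
    ∀ (k : Nat), k ≤ l1.length →
    (PySem.List.pyRange 0 (k : Int) 1).foldl
      (fun (st : List (List Int) × List (List Int)) i =>
        let l2 := st.1 ++ [[]]
        let l3 := st.2 ++ [[]]
        let l2 := (PySem.List.pyRange 0 (l1.length : Int) 1).foldl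
          (fun l2 x => PySem.List.pySetD l2 i
            (PySem.List.pyGetD l2 i [] ++ [PySem.List.pyGetD l1 (i - x) 0])) l2
        let l3 := if (PySem.List.pyGetD l2 i []) ∈ l3
                  then l3
                  else PySem.List.pySetD l3 i (PySem.List.pyGetD l2 i [])
        (l2, l3)) ([], [])
    = ((List.range k).map (rotRow l1), ((List.range k).map (rotRow l1)).foldl stepA []) := by
  intro k
  induction k with
  | zero => intro _; simp [PySem.List.pyRange_one_eq_nil]
  | succ k ih =>
    intro hk
    have hk' : k < l1.length := by omega
    have hcast : ((k + 1 : Nat) : Int) = (k : Int) + 1 := by push_cast; ring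
    rw [hcast, PySem.List.pyRange_one_succ_right (by omega), List.foldl_append,
      ih (by omega)]
    simp only [List.foldl_cons, List.foldl_nil]
    have hlenR : ((List.range k).map (rotRow l1)).length = k := by simp
    have hrow := innerA l1 k (l1.length : Int) ((l1.length : Int) - 0).toNat 0 (by omega) rfl
      ((List.range k).map (rotRow l1)) [] hlenR
    rw [hrow]
    simp only [List.nil_append]
    rw [rowEq l1 k hk']
    have hAccLen : (((List.range k).map (rotRow l1)).foldl stepA []).length = k := by
      rw [length_foldl_stepA]; simp
    have hget : PySem.List.pyGetD ((List.range k).map (rotRow l1) ++ [rotRow l1 k]) (k : Int) []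
        = rotRow l1 k := by
      rw [PySem.List.pyGetD_natCast, getD_append_singleton _ _ k hlenR]
    rw [hget]
    have hset : PySem.List.pySetD
        ((((List.range k).map (rotRow l1)).foldl stepA []) ++ [[]]) (k : Int) (rotRow l1 k)
        = (((List.range k).map (rotRow l1)).foldl stepA []) ++ [rotRow l1 k] := by
      rw [PySem.List.pySetD_natCast, set_append_singleton _ _ _ k hAccLen]
    rw [hset]
    rw [List.range_succ, List.map_append, List.foldl_append]
    simp only [List.map_cons, List.map_nil, List.foldl_cons, List.foldl_nil]
    simp only [Prod.mk.injEq]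
    constructor
    · trivial
    · by_cases hmem : rotRow l1 k ∈ (((List.range k).map (rotRow l1)).foldl stepA []) ++ [[]]
      · rw [if_pos hmem]
        simp only [stepA]
        rw [if_pos hmem]
      · rw [if_neg hmem]
        simp only [stepA]
        rw [if_neg hmem]

-- A's foldl equals the canonical mark, given nonempty rows and a seen-set matching the accumulator
theorem foldl_stepA_eq_mark (rs : List (List Int)) :
    ∀ (seen acc : List (List Int)),
    (∀ r ∈ rs, r ≠ []) →
    (∀ t : List Int, t ≠ [] → (t ∈ acc ↔ t ∈ seen)) →
    rs.foldl stepA acc = acc ++ mark seen rs := by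
  induction rs with
  | nil => intro seen acc _ _; simp [mark]
  | cons r rs ih =>
    intro seen acc hne hinv
    have hr : r ≠ [] := hne r (by simp)
    have hcond : (r ∈ acc ++ [[]]) ↔ r ∈ seen := by
      rw [List.mem_append]
      constructor
      · rintro (h | h)
        · exact (hinv r hr).mp h
        · simp at h; exact absurd h hr
      · intro h; exact Or.inl ((hinv r hr).mpr h)
    have hstep : stepA acc r = acc ++ [if r ∈ seen then [] else r] := by
      unfold stepA
      by_cases h : r ∈ seen
      · rw [if_pos (hcond.mpr h), if_pos h]
      · rw [if_neg (fun hc => h (hcond.mp hc)), if_neg h]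
    simp only [List.foldl_cons, hstep, mark]
    rw [ih (seen ++ [r]) (acc ++ [if r ∈ seen then [] else r])
      (fun x hx => hne x (by simp [hx]))
      ?_]
    · simp
    · intro t ht
      by_cases h : r ∈ seen
      · simp only [if_pos h, List.mem_append, List.mem_singleton]
        constructor
        · rintro (h1 | h1)
          · exact Or.inl ((hinv t ht).mp h1)
          · exact absurd h1 ht
        · rintro (h1 | h1)
          · exact Or.inl ((hinv t ht).mpr h1)
          · subst h1; exact Or.inl ((hinv t ht).mpr h)
      · simp only [if_neg h, List.mem_append, List.mem_singleton]
        constructor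
        · rintro (h1 | h1)
          · exact Or.inl ((hinv t ht).mp h1)
          · exact Or.inr h1
        · rintro (h1 | h1)
          · exact Or.inl ((hinv t ht).mpr h1)
          · exact Or.inr h1

-- mark in indexed form
theorem mark_eq_map (rs : List (List Int)) :
    ∀ (seen : List (List Int)),
    mark seen rs = (List.range rs.length).map
      (fun i => if rs.getD i [] ∈ seen ++ rs.take i then [] else rs.getD i []) := by
  induction rs with
  | nil => intro seen; simp [mark]
  | cons r rs ih =>
    intro seen
    simp only [mark, List.length_cons, List.range_succ_eq_map, List.map_cons, List.map_map]
    congr 1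
    · simp
    · rw [ih (seen ++ [r])]
      apply List.map_congr_left
      intro i hi
      simp only [Function.comp]
      have h1 : (r :: rs).getD (i + 1) [] = rs.getD i [] := by simp [List.getD]
      have h2 : (r :: rs).take (i + 1) = r :: rs.take i := by simp
      rw [h1, h2]
      congr 2
      simp

theorem rotsOf_ne_nil (l1 : List Int) : ∀ r ∈ rotsOf l1, r ≠ [] := by
  intro r hr
  simp only [rotsOf, List.mem_map] at hr
  obtain ⟨i, hi, rfl⟩ := hr
  simp only [List.mem_range] at hi
  intro hc
  have := length_rotRow l1 i
  rw [hc] at this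
  simp at this
  omega

-- unfold f to the foldl-stepA form
theorem f_eq_foldl (l1 : List Int) :
    f l1 = (rotsOf l1).foldl stepA [] := by
  unfold f
  simp only [PySem.List.len_eq]
  have := outerA l1 l1.length (Nat.le_refl _)
  rw [this]
  simp [rotsOf]

-- ===== the period view =====

-- rows are reversed rotations
theorem rotRow_eq_reverse_rotate (l1 : List Int) (i : Nat) (hi : i < l1.length) :
    rotRow l1 i = (l1.rotate (i + 1)).reverse := by
  rw [rotRow, List.rotate_eq_drop_append_take (by omega), List.reverse_append]

-- row equality is cyclic periodicity of the gap
theorem rotRow_eq_iff (l1 : List Int) (j i : Nat) (hj : j ≤ i) (hi : i < l1.length) :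
    rotRow l1 j = rotRow l1 i ↔ l1.rotate (i - j) = l1 := by
  rw [rotRow_eq_reverse_rotate l1 j (by omega), rotRow_eq_reverse_rotate l1 i hi,
    List.reverse_inj]
  constructor
  · intro h
    have h2 := congrArg (fun t => List.rotate t (l1.length - (j + 1))) h
    simp only [List.rotate_rotate] at h2
    have e1 : j + 1 + (l1.length - (j + 1)) = l1.length := by omega
    have e2 : i + 1 + (l1.length - (j + 1)) = l1.length + (i - j) := by omega
    rw [e1, e2, List.rotate_length, ← List.rotate_rotate, List.rotate_length] at h2
    exact h2.symm
  · intro h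
    have : l1.rotate ((i - j) + (j + 1)) = l1.rotate (j + 1) := by
      rw [← List.rotate_rotate, h]
    rw [show (i - j) + (j + 1) = i + 1 by omega] at this
    exact this.symm

-- the boolean period test of the B port decides rotation invariance
theorem predB_iff (l1 : List Int) (hn : 0 < l1.length) (d : Nat) :
    ((List.range l1.length).all
      (fun k => l1.getD ((k + d) % l1.length) 0 == l1.getD k 0)) = true
    ↔ l1.rotate d = l1 := by
  rw [List.all_eq_true]
  constructor
  · intro h
    apply List.ext_getElem (by simp)
    intro k hk hk'
    have hm := h k (List.mem_range.mpr (by simpa using hk'))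
    rw [beq_iff_eq] at hm
    rw [List.getElem_rotate]
    have hlt : (k + d) % l1.length < l1.length := Nat.mod_lt _ hn
    rw [List.getD_eq_getElem _ _ hlt, List.getD_eq_getElem _ _ (by simpa using hk')] at hm
    simpa using hm
  · intro h k hk
    rw [beq_iff_eq]
    have hk' : k < l1.length := List.mem_range.mp hk
    have hlt : (k + d) % l1.length < l1.length := Nat.mod_lt _ hn
    rw [List.getD_eq_getElem _ _ hlt, List.getD_eq_getElem _ _ hk']
    have := congrArg (fun t => t.getD k (0 : Int)) h
    simp only at this
    rw [List.getD_eq_getElem _ _ (by simp; omega),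
      List.getD_eq_getElem _ _ hk', List.getElem_rotate] at this
    simpa using this

-- existence of a positive period (the length itself works)
theorem exPeriod (l1 : List Int) (hn : 0 < l1.length) :
    ∃ d, 0 < d ∧ l1.rotate d = l1 :=
  ⟨l1.length, hn, List.rotate_length l1⟩

-- the minimal positive cyclic period
def minP (l1 : List Int) (hn : 0 < l1.length) : Nat :=
  Nat.find (exPeriod l1 hn)

theorem minP_pos (l1 : List Int) (hn : 0 < l1.length) : 0 < minP l1 hn :=
  (Nat.find_spec (exPeriod l1 hn)).1

theorem minP_rotate (l1 : List Int) (hn : 0 < l1.length) :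
    l1.rotate (minP l1 hn) = l1 :=
  (Nat.find_spec (exPeriod l1 hn)).2

theorem minP_le_length (l1 : List Int) (hn : 0 < l1.length) : minP l1 hn ≤ l1.length :=
  Nat.find_le ⟨hn, List.rotate_length l1⟩

theorem minP_min (l1 : List Int) (hn : 0 < l1.length) (d : Nat) (hd : 0 < d)
    (hrot : l1.rotate d = l1) : minP l1 hn ≤ d :=
  Nat.find_le ⟨hd, hrot⟩

-- find? over range' s m picks the minimal satisfying value
theorem find?_range'_min (pred : Nat → Bool) (q : Nat) :
    ∀ (m s : Nat), s ≤ q → q < s + m → pred q = true →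
    (∀ r, s ≤ r → r < q → pred r = false) →
    (List.range' s m).find? pred = some q := by
  intro m
  induction m with
  | zero => intro s h1 h2; omega
  | succ m ih =>
    intro s h1 h2 hq hmin
    rw [List.range'_succ, List.find?_cons]
    by_cases hs : s = q
    · subst hs; rw [hq]
    · have hlt : s < q := by omega
      rw [hmin s (le_refl _) hlt]
      exact ih (s + 1) (by omega) (by omega) hq (fun r hr1 hr2 => hmin r (by omega) hr2)

-- the B port's p is minP
theorem p_eq_minP (l1 : List Int) (hn : 0 < l1.length) :
    (((List.range' 1 l1.length).find? (fun d =>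
      (List.range l1.length).all
        (fun k => l1.getD ((k + d) % l1.length) 0 == l1.getD k 0))).getD l1.length)
    = minP l1 hn := by
  rw [find?_range'_min _ (minP l1 hn) l1.length 1 (minP_pos l1 hn)
    (by have := minP_le_length l1 hn; omega)
    ((predB_iff l1 hn _).mpr (minP_rotate l1 hn))
    (fun r hr1 hr2 => by
      rw [← Bool.not_eq_true]
      intro hc
      have := minP_min l1 hn r (by omega) ((predB_iff l1 hn r).mp hc)
      omega)]
  rfl

-- duplicate row at i ⟺ the minimal period is ≤ i
theorem dup_iff (l1 : List Int) (hn : 0 < l1.length) (i : Nat) (hi : i < l1.length) :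
    rotRow l1 i ∈ (rotsOf l1).take i ↔ minP l1 hn ≤ i := by
  have htake : (rotsOf l1).take i = (List.range i).map (rotRow l1) := by
    rw [rotsOf, ← List.map_take, List.take_range, Nat.min_eq_left (by omega)]
  rw [htake, List.mem_map]
  constructor
  · rintro ⟨j, hj, hrow⟩
    rw [List.mem_range] at hj
    have := (rotRow_eq_iff l1 j i (by omega) hi).mp hrow
    have hle := minP_min l1 hn (i - j) (by omega) this
    omega
  · intro hle
    refine ⟨i - minP l1 hn, List.mem_range.mpr (by have := minP_pos l1 hn; omega), ?_⟩
    apply (rotRow_eq_iff l1 (i - minP l1 hn) i (by omega) hi).mpr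
    rw [show i - (i - minP l1 hn) = minP l1 hn by omega]
    exact minP_rotate l1 hn

-- the slice expression in the B port is rotRow
theorem slice_eq_rotRow (l1 : List Int) (i : Nat) :
    (PySem.List.slice l1 none (some ((i : Int) + 1))).reverse ++
      (PySem.List.slice l1 (some ((i : Int) + 1)) none).reverse = rotRow l1 i := by
  have hc : ((i : Int) + 1) = (((i + 1 : Nat) : Int)) := by push_cast; ring
  rw [hc, PySem.List.slice_to_natCast, PySem.List.slice_from_natCast]
  rfl

-- f_alt in indexed form
theorem f_alt_eq_map (l1 : List Int) (hn : 0 < l1.length) :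
    f_alt l1 = (List.range l1.length).map
      (fun i => if minP l1 hn ≤ i then [] else rotRow l1 i) := by
  unfold f_alt
  rw [if_neg (by omega)]
  simp only [p_eq_minP l1 hn]
  have hple := minP_le_length l1 hn
  apply List.ext_getElem
  · simp; omega
  · intro j hj hj'
    have hjn : j < l1.length := by simpa using hj'
    by_cases hjp : j < minP l1 hn
    · rw [List.getElem_append_left (by simp; omega)]
      simp only [List.getElem_map, List.getElem_range]
      rw [slice_eq_rotRow, if_neg (by omega)]
    · rw [List.getElem_append_right (by simp; omega)]
      simp only [List.getElem_map, List.getElem_range, List.getElem_replicate]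
      rw [if_pos (by omega)]

-- ===== VERDICT (by name: the statement is the Claim_ definition above) =====
theorem f_spec : Claim_equal_f := by
  intro l1 _
  unfold Spec_f
  by_cases hn : l1.length = 0
  · have hnil : l1 = [] := List.eq_nil_of_length_eq_zero hn
    subst hnil
    rfl
  · have hn' : 0 < l1.length := Nat.pos_of_ne_zero hn
    rw [f_eq_foldl, f_alt_eq_map l1 hn']
    rw [foldl_stepA_eq_mark (rotsOf l1) [] [] (rotsOf_ne_nil l1) (by simp)]
    rw [List.nil_append, mark_eq_map]
    have hlen : (rotsOf l1).length = l1.length := by simp [rotsOf]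
    rw [hlen]
    apply List.map_congr_left
    intro i hi
    rw [List.mem_range] at hi
    have hget : (rotsOf l1).getD i [] = rotRow l1 i := by
      rw [rotsOf, List.getD_eq_getElem _ _ (by simp; omega)]
      simp
    rw [hget]
    simp only [List.nil_append]
    by_cases h : rotRow l1 i ∈ (rotsOf l1).take i
    · rw [if_pos h, if_pos ((dup_iff l1 hn' i hi).mp h)]
    · rw [if_neg h, if_neg (fun hc => h ((dup_iff l1 hn' i hi).mpr hc))]
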